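-- pv_equiv track=rewrite | github.com/wazuh/wazuh-dashboard-plugins | docker/splunk-dashboard/splunk-etc/apps/python_upgrade_readiness_app/bin/libs_py3/pura_libs_utils/splunk_appinspect/ast_analyzer.py | _is_prefix_module
-- ===== SOURCE A (Python) =====
-- def _is_prefix_module(prefix_module, module):
--
--     prefix_string_array = prefix_module.split(".")
--     module_string_array = module.split(".")
--     i = 0
--     while (
--         i < len(prefix_string_array)
--         and i < len(module_string_array)
--         and (prefix_string_array[i] == module_string_array[i])
--     ):
--         i += 1
--     return i == len(prefix_string_array)
-- ===== SOURCE B (Python) =====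
-- def _is_prefix_module(prefix_module, module):
--     return module == prefix_module or module.startswith(prefix_module + ".")
-- ===== Notes on version B (the rewrite author's own statement) =====
-- stated objective: idiomatic
-- what changed: Replaced the split-into-segment-arrays plus index-loop comparison with a direct string test: equality or startswith(prefix + '.'), which enforces the segment boundary without building any lists.
import Mathlib
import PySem

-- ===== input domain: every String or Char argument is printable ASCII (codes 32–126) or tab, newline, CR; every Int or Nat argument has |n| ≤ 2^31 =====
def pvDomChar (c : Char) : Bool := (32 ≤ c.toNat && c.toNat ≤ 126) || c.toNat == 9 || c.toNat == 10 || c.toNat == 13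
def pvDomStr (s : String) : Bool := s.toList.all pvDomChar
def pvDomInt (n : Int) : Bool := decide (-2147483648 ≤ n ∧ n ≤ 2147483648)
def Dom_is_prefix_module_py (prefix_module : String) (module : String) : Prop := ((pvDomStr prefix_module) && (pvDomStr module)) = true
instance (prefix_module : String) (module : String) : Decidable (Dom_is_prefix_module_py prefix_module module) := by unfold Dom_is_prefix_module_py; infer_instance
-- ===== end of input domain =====

-- B replaces A's split-into-segment-arrays + index loop by the idiomatic one-line string test
-- `module == prefix_module or module.startswith(prefix_module + ".")` (no segment lists built).

-- ===== PORT A =====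
-- the while loop of A: advance i while both arrays have an element at i and they are equal;
-- ported as structural recursion returning the final i (the count of matching leading segments)
def pvWhileA : List (List Char) → List (List Char) → Nat
  | a :: as, b :: bs => if a = b then pvWhileA as bs + 1 else 0
  | _, _ => 0

def is_prefix_module_py (prefix_module : String) (module : String) : Bool :=
  -- prefix_module.split(".") / module.split("."): sep "." ≠ "", so Python's split is exactly
  -- PySem.Chars.splitOn on the code points (PySem.Str.split? "." returns some of this list)
  let prefix_string_array := PySem.Chars.splitOn prefix_module.toList ['.']
  let module_string_array := PySem.Chars.splitOn module.toList ['.']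
  let i := pvWhileA prefix_string_array module_string_array
  decide (i = prefix_string_array.length)

-- ===== PORT B =====
def is_prefix_module_py_alt (prefix_module : String) (module : String) : Bool :=
  (module == prefix_module) || PySem.Str.startswith module (prefix_module ++ ".")

-- ===== PRECONDITION & SPEC =====
def Spec_is_prefix_module_py (prefix_module : String) (module : String) (out : Bool) : Prop := out = is_prefix_module_py_alt prefix_module module
instance (prefix_module : String) (module : String) (out : Bool) : Decidable (Spec_is_prefix_module_py prefix_module module out) := by unfold Spec_is_prefix_module_py; infer_instance

-- ===== CLAIM (what is proved, stated in full; the proofs are below) =====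
def Claim_equal_is_prefix_module_py : Prop := ∀ (prefix_module : String) (module : String), Dom_is_prefix_module_py prefix_module module → Spec_is_prefix_module_py prefix_module module (is_prefix_module_py prefix_module module)

-- ===== LEMMAS AND PROOFS =====

-- PySem.Chars.splitOn with a single-character separator is Mathlib's List.splitOn
theorem pv_go_eq :
    ∀ (l : List Char) (fuel : Nat) (cur : List Char) (acc : List (List Char)),
      l.length < fuel →
      PySem.Chars.splitOn.go ['.'] fuel l cur acc
        = acc.reverse ++ (l.splitOn '.').modifyHead (cur.reverse ++ ·) := by
  intro l
  induction l with
  | nil =>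
    intro fuel cur acc hf
    match fuel, hf with
    | fuel + 1, _ =>
      simp [PySem.Chars.splitOn.go, List.splitOn_nil]
  | cons c rest ih =>
    intro fuel cur acc hf
    match fuel, hf with
    | fuel + 1, hf =>
      have hr : rest.length < fuel := by simpa using Nat.lt_of_succ_lt_succ hf
      by_cases hc : c = '.'
      · subst hc
        rw [show PySem.Chars.splitOn.go ['.'] (fuel+1) ('.' :: rest) cur acc
              = PySem.Chars.splitOn.go ['.'] fuel (List.drop 1 ('.' :: rest)) [] (cur.reverse :: acc) by
            simp [PySem.Chars.splitOn.go, List.isPrefixOf]]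
        rw [List.drop_one, List.tail_cons, ih fuel [] (cur.reverse :: acc) hr]
        have hspl : ('.' :: rest).splitOn '.' = [] :: rest.splitOn '.' := by
          simp [List.splitOn, List.splitOnP_cons]
        rw [hspl]
        cases h : rest.splitOn '.' with
        | nil => exact absurd h (List.splitOnP_ne_nil _ _)
        | cons x xs => simp [List.modifyHead]
      · rw [show PySem.Chars.splitOn.go ['.'] (fuel+1) (c :: rest) cur acc
              = PySem.Chars.splitOn.go ['.'] fuel rest (c :: cur) acc by
            simp [PySem.Chars.splitOn.go, List.isPrefixOf]
            intro h
            exact absurd h.symm hc]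
        rw [ih fuel (c :: cur) acc hr]
        have hspl : (c :: rest).splitOn '.' = (rest.splitOn '.').modifyHead (c :: ·) := by
          simp [List.splitOn, List.splitOnP_cons, hc]
        rw [hspl]
        cases h : rest.splitOn '.' with
        | nil => exact absurd h (List.splitOnP_ne_nil _ _)
        | cons x xs => simp [List.modifyHead]

theorem pv_splitOn_eq (cs : List Char) :
    PySem.Chars.splitOn cs ['.'] = cs.splitOn '.' := by
  rw [PySem.Chars.splitOn, pv_go_eq cs (cs.length + 1) [] [] (Nat.lt_succ_self _)]
  cases h : cs.splitOn '.' with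
  | nil => exact absurd h (List.splitOnP_ne_nil _ _)
  | cons x xs => simp [List.modifyHead]

-- the while loop reaches the end of the prefix array iff it is a list-prefix of the module array
theorem pv_while_iff (as bs : List (List Char)) :
    pvWhileA as bs = as.length ↔ as <+: bs := by
  induction as generalizing bs with
  | nil => simp [pvWhileA]
  | cons a as ih =>
    cases bs with
    | nil => simp [pvWhileA]
    | cons b bs =>
      by_cases hab : a = b
      · subst hab
        simp [pvWhileA, ih, List.cons_prefix_cons]
      · simp [pvWhileA, hab, List.cons_prefix_cons]

-- intercalate distributes over append of two nonempty lists of pieces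
theorem pv_intercalate_append (P R : List (List Char)) (hP : P ≠ []) (hR : R ≠ []) :
    ['.'].intercalate (P ++ R) = ['.'].intercalate P ++ ['.'] ++ ['.'].intercalate R := by
  induction P with
  | nil => exact absurd rfl hP
  | cons p ps ih =>
    cases ps with
    | nil =>
      cases R with
      | nil => exact absurd rfl hR
      | cons r rs => simp [List.intercalate]
    | cons q qs =>
      have h1 := ih (by simp)
      cases R with
      | nil => exact absurd rfl hR
      | cons r rs =>
        have e1 : ['.'].intercalate (p :: q :: (qs ++ r :: rs))
            = p ++ ['.'] ++ ['.'].intercalate (q :: (qs ++ r :: rs)) := by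
          simp [List.intercalate, List.intersperse]
        have e2 : ['.'].intercalate (p :: q :: qs)
            = p ++ ['.'] ++ ['.'].intercalate (q :: qs) := by
          simp [List.intercalate, List.intersperse]
        simp only [List.cons_append] at *
        rw [e1, h1, e2]
        simp [List.append_assoc]

-- splitting a string with a '.' inserted at a segment boundary splits both halves
theorem pv_splitOn_boundary (ps t : List Char) :
    (ps ++ '.' :: t).splitOn '.' = ps.splitOn '.' ++ t.splitOn '.' := by
  induction ps with
  | nil => simp [List.splitOn, List.splitOnP_cons, List.splitOnP_nil]
  | cons c ps ih =>
    by_cases hc : c = '.'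
    · subst hc
      simp only [List.cons_append, List.splitOn, List.splitOnP_cons, beq_self_eq_true, if_true]
      simpa [List.splitOn] using ih
    · simp only [List.cons_append, List.splitOn, List.splitOnP_cons,
        beq_iff_eq, hc, if_false] at *
      rw [ih]
      cases h : List.splitOnP (fun x => x == '.') ps with
      | nil => exact absurd h (List.splitOnP_ne_nil _ _)
      | cons x xs => simp [List.modifyHead]

-- the segment-prefix relation, characterised on the raw strings
theorem pv_main (ps ms : List Char) :
    (ps.splitOn '.' <+: ms.splitOn '.') ↔ (ms = ps ∨ (ps ++ ['.']) <+: ms) := by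
  constructor
  · rintro ⟨R, hR⟩
    cases R with
    | nil =>
      left
      have := List.intercalate_splitOn ms '.'
      rw [← hR] at this
      simpa [List.intercalate_splitOn] using this.symm
    | cons r rs =>
      right
      have hms := List.intercalate_splitOn ms '.'
      rw [← hR, pv_intercalate_append (ps.splitOn '.') (r :: rs)
          (List.splitOnP_ne_nil _ _) (by simp)] at hms
      rw [List.intercalate_splitOn] at hms
      exact ⟨['.'].intercalate (r :: rs), by simpa [List.append_assoc] using hms⟩
  · rintro (rfl | ⟨t, ht⟩)
    · exact List.prefix_refl _
    · have : ms = ps ++ '.' :: t := by simpa using ht.symm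
      subst this
      rw [pv_splitOn_boundary]
      exact List.prefix_append _ _

-- ===== VERDICT (by name: the statement is the Claim_ definition above) =====
theorem is_prefix_module_py_spec : Claim_equal_is_prefix_module_py := by
  intro p m _
  show is_prefix_module_py p m = is_prefix_module_py_alt p m
  simp only [is_prefix_module_py, is_prefix_module_py_alt, pv_splitOn_eq]
  rw [Bool.eq_iff_iff]
  simp only [decide_eq_true_eq, Bool.or_eq_true, beq_iff_eq,
    PySem.Str.startswith, PySem.Chars.startswith_iff, String.toList_append]
  rw [pv_while_iff, pv_main p.toList m.toList]
  constructor
  · rintro (h | h)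
    · exact Or.inl (String.ext h)
    · exact Or.inr (by simpa using h)
  · rintro (rfl | h)
    · exact Or.inl rfl
    · exact Or.inr (by simpa using h)
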